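-- pv_equiv track=rewrite | github.com/mch-sg/dtu-public | 1-semester/02002-programming/psets/w08/name_frequency.py | name_frequency
-- ===== SOURCE A (Python) =====
-- def name_frequency(names):
--     dict = {}
--     arr = []
--     nr = 0
--
--     for i in range(len(names)):
--         first_name = names[i].split() # Get the first name of the persons
--         arr.append(first_name[0]) # Get all the first names into a list
--         nr = arr.count(first_name[0]) # Count how many times it appears
--
--         dict[first_name[0]] = nr # Set it into the dictionary, name, count
--
--     return dict
-- ===== SOURCE B (Python) =====
-- def name_frequency(names):
--     firsts = [n.split()[0] for n in names]
--     return {f: firsts.count(f) for f in dict.fromkeys(firsts)}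
-- ===== Notes on version B (the rewrite author's own statement) =====
-- stated objective: simpler
-- what changed: B replaces A's running dict/list with overwritten counts by two staged passes: extract all first names, deduplicate them in order, then compute each distinct name's total count once over the whole list.
import Mathlib
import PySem

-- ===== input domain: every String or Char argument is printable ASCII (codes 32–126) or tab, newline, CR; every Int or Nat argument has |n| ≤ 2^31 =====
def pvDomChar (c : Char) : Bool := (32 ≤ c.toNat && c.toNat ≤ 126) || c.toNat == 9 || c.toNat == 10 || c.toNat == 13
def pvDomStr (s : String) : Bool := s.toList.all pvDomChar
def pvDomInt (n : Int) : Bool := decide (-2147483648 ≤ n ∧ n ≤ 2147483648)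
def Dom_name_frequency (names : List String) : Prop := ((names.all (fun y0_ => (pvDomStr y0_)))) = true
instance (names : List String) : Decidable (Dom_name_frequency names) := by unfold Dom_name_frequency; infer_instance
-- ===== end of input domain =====

-- B replaces A's running dict/list with overwritten counts by two staged passes: extract all
-- first names, deduplicate them in order, then count each distinct name once over the whole
-- list (simpler).

-- ===== PORT A =====
def name_frequency (names : List String) : List (String × Int) :=
  ((PySem.List.pyRange 0 (PySem.List.len names) 1).foldl
    (fun (st : PySem.Dict String Int × List String) i =>
      let first_name := PySem.Str.split₀ (PySem.List.pyGetD names i "")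
      let f := (PySem.List.pyGet? first_name 0).getD ""   -- first_name[0]; none (IndexError) excluded by Pre_
      let arr := st.2 ++ [f]
      let nr : Int := PySem.List.count arr f
      (st.1.insert f nr, arr))
    (PySem.Dict.empty, [])).1.items

-- ===== PORT B =====
def name_frequency_alt (names : List String) : List (String × Int) :=
  let firsts := names.map (fun n => (PySem.List.pyGet? (PySem.Str.split₀ n) 0).getD "")   -- n.split()[0]; IndexError excluded by Pre_
  -- {f: firsts.count(f) for f in dict.fromkeys(firsts)}
  ((PySem.List.dedup firsts).foldl
    (fun (d : PySem.Dict String Int) f => d.insert f (PySem.List.count firsts f))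
    PySem.Dict.empty).items

-- ===== PRECONDITION & SPEC =====
-- Pre_ excludes exactly the inputs where some name is empty/whitespace-only, on which A (and B) raise IndexError.
def Pre_name_frequency (names : List String) : Prop :=
  ∀ n ∈ names, PySem.Str.split₀ n ≠ []
instance (names : List String) : Decidable (Pre_name_frequency names) := by unfold Pre_name_frequency; infer_instance

def pvWitness_name_frequency : List String := ["Anna Smith", "Bob", "Anna Lee"]

def Spec_name_frequency (names : List String) (out : List (String × Int)) : Prop := out = name_frequency_alt names
instance (names : List String) (out : List (String × Int)) : Decidable (Spec_name_frequency names out) := by unfold Spec_name_frequency; infer_instance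

-- ===== CLAIM (what is proved, stated in full; the proofs are below) =====
def Claim_equal_name_frequency : Prop := ∀ (names : List String), Dom_name_frequency names → Pre_name_frequency names → Spec_name_frequency names (name_frequency names)

-- ===== LEMMAS AND PROOFS =====

-- A's loop state (dict, arr): the dict is the counter of the processed first names, arr their list.
theorem nf_A_loop (l : List String) (d : PySem.Dict String Int) (arr : List String)
    (h : ∀ s : String, d.getD s 0 = (arr.count s : Int)) :
    (l.foldl
      (fun (st : PySem.Dict String Int × List String) name =>
        let f := (PySem.List.pyGet? (PySem.Str.split₀ name) 0).getD ""
        let arr := st.2 ++ [f]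
        let nr : Int := PySem.List.count arr f
        (st.1.insert f nr, arr))
      (d, arr)).1
    = l.foldl
      (fun (freq : PySem.Dict String Int) name =>
        let first := (PySem.List.pyGet? (PySem.Str.split₀ name) 0).getD ""
        freq.insert first (freq.getD first 0 + 1))
      d := by
  induction l generalizing d arr with
  | nil => rfl
  | cons x xs ih =>
    simp only [List.foldl_cons]
    have hcnt : (PySem.List.count (arr ++ [(PySem.List.pyGet? (PySem.Str.split₀ x) 0).getD ""])
        ((PySem.List.pyGet? (PySem.Str.split₀ x) 0).getD "") : Int)
        = d.getD ((PySem.List.pyGet? (PySem.Str.split₀ x) 0).getD "") 0 + 1 := by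
      simp [h]
    rw [show (PySem.List.count (arr ++ [(PySem.List.pyGet? (PySem.Str.split₀ x) 0).getD ""])
        ((PySem.List.pyGet? (PySem.Str.split₀ x) 0).getD "") : Int)
        = d.getD ((PySem.List.pyGet? (PySem.Str.split₀ x) 0).getD "") 0 + 1 from hcnt]
    apply ih
    intro s
    set f := (PySem.List.pyGet? (PySem.Str.split₀ x) 0).getD "" with hf
    rw [PySem.Dict.getD_insert]
    by_cases hs : s = f
    · subst hs
      simp [h]
    · simp [hs, h s, List.count_append, Ne.symm hs]

-- ===== VERDICT (by name: the statement is the Claim_ definition above) =====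
theorem name_frequency_spec : Claim_equal_name_frequency := by
  intro names _ _
  show name_frequency names = name_frequency_alt names
  unfold name_frequency name_frequency_alt
  -- A's index loop is a fold over names
  have hb := PySem.List.foldl_pyRange_pyGetD (xs := names) (d := "")
    (f := fun (st : PySem.Dict String Int × List String) (name : String) =>
        let first_name := PySem.Str.split₀ name
        let f := (PySem.List.pyGet? first_name 0).getD ""
        let arr := st.2 ++ [f]
        let nr : Int := PySem.List.count arr f
        (st.1.insert f nr, arr))
    (init := ((PySem.Dict.empty : PySem.Dict String Int), ([] : List String))) (a := 0) (by norm_num)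
  simp only [Int.toNat_zero, List.drop_zero] at hb
  rw [hb, nf_A_loop names PySem.Dict.empty [] (by intro s; simp)]
  -- the canonical counting fold IS the counter of the mapped first names
  have h2 : names.foldl
      (fun (freq : PySem.Dict String Int) name =>
        let first := (PySem.List.pyGet? (PySem.Str.split₀ name) 0).getD ""
        freq.insert first (freq.getD first 0 + 1))
      PySem.Dict.empty
      = PySem.Dict.counter (names.map (fun n => (PySem.List.pyGet? (PySem.Str.split₀ n) 0).getD "")) := by
    rw [← PySem.Dict.foldl_insert_getD_add_one_eq_counter, List.foldl_map]
  rw [h2, PySem.Dict.items_counter]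
  -- B's fresh-key insert loop appends its pairs in order
  show _ = ((PySem.List.dedup (names.map (fun n => (PySem.List.pyGet? (PySem.Str.split₀ n) 0).getD ""))).foldl
      (fun (d : PySem.Dict String Int) f =>
        d.insert f (PySem.List.count (names.map (fun n => (PySem.List.pyGet? (PySem.Str.split₀ n) 0).getD "")) f))
      PySem.Dict.empty).items
  refine Eq.trans ?_ (PySem.Dict.items_foldl_insert_fresh
      (k := fun f => f)
      (v := fun f => (PySem.List.count (names.map (fun n => (PySem.List.pyGet? (PySem.Str.split₀ n) 0).getD "")) f : Int))
      (l := PySem.List.dedup (names.map (fun n => (PySem.List.pyGet? (PySem.Str.split₀ n) 0).getD "")))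
      (d := PySem.Dict.empty)
      (by intro a _; exact PySem.Dict.contains_empty a)
      (by simp)).symm
  simp [PySem.List.dedup_eq_ofList, PySem.List.count]
  rfl
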